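-- pv_equiv track=rewrite | github.com/NobuyukiInoue/LeetCode | Problems/1400_1499/1488_Avoid_Flood_in_The_City/Project_Python3/Avoid_Flood_in_The_City.py | avoidFlood2
-- ===== SOURCE A (Python) =====
-- import bisect
--
-- def avoidFlood2(rains: [int]) -> [int]:
--     # 1176ms
--     if rains == []:
--         return []
--     N = len(rains)
--     dry = []
--     last_rain = {}
--     ans = [1]*N
--     for i in range(N):
--         lake = rains[i]
--         if lake == 0:
--             dry.append(i)
--         else:
--             if lake in last_rain:
--                 last_rain_day = last_rain[lake]
--                 dry_id = bisect.bisect(dry, last_rain_day)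
--                 if dry_id == len(dry):
--                     return []
--                 use_dry = dry.pop(dry_id)
--                 ans[use_dry] = lake
--             last_rain[lake] = i
--             ans[i] = -1
--     return ans
-- ===== SOURCE B (Python) =====
-- def avoidFlood2(rains: [int]) -> [int]:
--     # Union-find ("next free dry day") over the dry days: each lake's refill looks up
--     # the first still-unused dry day after its last rain by pointer-jumping with path
--     # compression instead of bisect + list.pop; the answer is assembled at the end.
--     zeros = []    # dry days seen so far, in increasing order
--     parent = []   # parent[k] skips over already-used indices of zeros
--     fill = {}     # dry day -> lake dried on that day
--     last = {}     # lake -> number of dry days seen up to its last rain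
--     for i, r in enumerate(rains):
--         if r == 0:
--             parent.append(len(zeros))
--             zeros.append(i)
--         else:
--             if r in last:
--                 x = last[r]
--                 m = len(zeros)
--                 root = x
--                 while root < m and parent[root] != root:
--                     root = parent[root]
--                 if root == m:
--                     return []
--                 while parent[x] != root:
--                     parent[x], x = root, parent[x]
--                 parent[root] = root + 1
--                 fill[zeros[root]] = r
--             last[r] = len(zeros)
--     return [-1 if r != 0 else fill.get(d, 1) for d, r in enumerate(rains)]
-- ===== Notes on version B (the rewrite author's own statement) =====
-- stated objective: faster
-- what changed: Replaces A's sorted dry-day list with bisect successor search and O(n) list.pop deletion by a union-find 'next free dry day' structure over the dry days (pointer jumping with path compression), assembling the answer list once at the end instead of in-place updates.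
import Mathlib
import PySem

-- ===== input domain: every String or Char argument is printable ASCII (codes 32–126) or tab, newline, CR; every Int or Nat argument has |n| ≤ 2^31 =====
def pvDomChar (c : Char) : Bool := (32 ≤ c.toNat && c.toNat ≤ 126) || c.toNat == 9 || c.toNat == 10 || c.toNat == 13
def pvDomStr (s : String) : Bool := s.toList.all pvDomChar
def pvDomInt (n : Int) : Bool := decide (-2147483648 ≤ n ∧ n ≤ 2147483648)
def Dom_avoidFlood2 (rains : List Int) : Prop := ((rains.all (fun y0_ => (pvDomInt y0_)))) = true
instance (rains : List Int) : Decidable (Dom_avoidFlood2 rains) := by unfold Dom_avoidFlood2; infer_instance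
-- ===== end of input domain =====

-- B replaces A's bisect + list.pop successor search by a union-find "next free dry day"
-- structure over the dry days (objective: faster on flood-heavy inputs; same greedy result).


-- ===== PORT A =====
-- the 'for i in range(N)' loop of A, one step per enumerated (i, lake) pair
def aGo (items : List (Int × Int)) (dry : List Int) (lr : PySem.Dict Int Int)
    (ans : List Int) : List Int :=
  match items with
  | [] => ans
  | (i, lake) :: rest =>
    if lake = 0 then aGo rest (dry ++ [i]) lr ans
    else
      match lr.get? lake with
      | some lastRainDay =>
        let dryId := PySem.List.bisectRight dry lastRainDay
        if dryId = dry.length then []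
        else
          match PySem.List.pop? dry (dryId : Int) with
          | some (useDry, dry') =>
              aGo rest dry' (lr.insert lake i)
                (PySem.List.pySetD (PySem.List.pySetD ans useDry lake) i (-1))
          | none => []   -- unreachable: dryId < len(dry)
      | none => aGo rest dry (lr.insert lake i) (PySem.List.pySetD ans i (-1))

def avoidFlood2 (rains : List Int) : List Int :=
  if rains = [] then []
  else aGo (PySem.List.enumerate rains 0) [] PySem.Dict.empty
    (List.replicate rains.length (1 : Int))

-- ===== PORT B =====
-- 'root = x; while root < m and parent[root] != root: root = parent[root]'
def bFindRoot (parent : List Int) (m : Int) (fuel : Nat) (root : Int) : Int :=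
  match fuel with
  | 0 => root
  | fuel + 1 =>
    if root < m ∧ PySem.List.pyGetD parent root 0 ≠ root then
      bFindRoot parent m fuel (PySem.List.pyGetD parent root 0)
    else root

-- 'while parent[x] != root: parent[x], x = root, parent[x]'  (path compression)
def bCompress (parent : List Int) (root : Int) (fuel : Nat) (x : Int) : List Int :=
  match fuel with
  | 0 => parent
  | fuel + 1 =>
    let p := PySem.List.pyGetD parent x 0
    if p ≠ root then bCompress (PySem.List.pySetD parent x root) root fuel p
    else parent

-- the 'for i, r in enumerate(rains)' loop of B; none = early 'return []'
def bGo (items : List (Int × Int)) (zeros parent : List Int)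
    (fill last : PySem.Dict Int Int) : Option (PySem.Dict Int Int) :=
  match items with
  | [] => some fill
  | (i, r) :: rest =>
    if r = 0 then
      bGo rest (zeros ++ [i]) (parent ++ [(zeros.length : Int)]) fill last
    else
      match last.get? r with
      | some x =>
        let m : Int := (zeros.length : Int)
        let root := bFindRoot parent m (parent.length + 1) x
        if root = m then none
        else
          let parent1 := bCompress parent root (parent.length + 1) x
          bGo rest zeros (PySem.List.pySetD parent1 root (root + 1))
            (fill.insert (PySem.List.pyGetD zeros root 0) r)
            (last.insert r (zeros.length : Int))
      | none => bGo rest zeros parent fill (last.insert r (zeros.length : Int))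

def avoidFlood2_alt (rains : List Int) : List Int :=
  match bGo (PySem.List.enumerate rains 0) [] [] PySem.Dict.empty PySem.Dict.empty with
  | none => []
  | some fill =>
    (PySem.List.enumerate rains 0).map
      (fun di => if di.2 ≠ 0 then (-1 : Int) else fill.getD di.1 1)

-- ===== PRECONDITION & SPEC =====
def Spec_avoidFlood2 (rains : List Int) (out : List Int) : Prop := out = avoidFlood2_alt rains
instance (rains : List Int) (out : List Int) : Decidable (Spec_avoidFlood2 rains out) := by unfold Spec_avoidFlood2; infer_instance

-- ===== CLAIM (what is proved, stated in full; the proofs are below) =====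
def Claim_equal_avoidFlood2 : Prop := ∀ (rains : List Int), Dom_avoidFlood2 rains → Spec_avoidFlood2 rains (avoidFlood2 rains)

-- ===== LEMMAS AND PROOFS =====

-- ghost notions used only by the proofs
-- first index k with c ≤ k < m and u k = false; m if none
def freeFrom (u : Nat → Bool) (m c : Nat) : Nat :=
  if h : c < m then (if u c then freeFrom u m (c + 1) else c) else m
termination_by m - c

-- indices of the still-unused dry days
def frees (u : Nat → Bool) (m : Nat) : List Nat :=
  (List.range m).filter (fun k => !u k)

-- A's 'dry' list, reconstructed from B's data
def dryOf (zeros : List Int) (u : Nat → Bool) : List Int :=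
  (frees u zeros.length).map (fun k => zeros.getD k 0)

-- the union-find invariant on B's parent array
def InvP (parent : List Int) (u : Nat → Bool) (m : Nat) : Prop :=
  parent.length = m ∧
  ∀ k, k < m → ∃ p : Nat, parent.getD k 0 = (p : Int) ∧ k ≤ p ∧ p ≤ m ∧
    (∀ t, k ≤ t → t < p → u t = true) ∧ (u k = true → k < p)

def updU (u : Nat → Bool) (R : Nat) : Nat → Bool := fun k => if k = R then true else u k

-- the coupling invariant between A's and B's loop states after processing 'pre'
def RelAB (pre xs : List Int) (dry zeros parent : List Int)
    (lr last fill : PySem.Dict Int Int) (ans : List Int) (u : Nat → Bool) : Prop :=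
  zeros.Pairwise (· < ·) ∧
  (∀ k, k < zeros.length →
    0 ≤ zeros.getD k 0 ∧ zeros.getD k 0 < (pre.length : Int) ∧
    pre.getD (zeros.getD k 0).toNat 0 = 0) ∧
  dry = dryOf zeros u ∧
  InvP parent u zeros.length ∧
  (∀ k, u k = true → k < zeros.length) ∧
  (∀ lake, lr.get? lake = none ↔ last.get? lake = none) ∧
  (∀ lake d, lr.get? lake = some d →
    0 ≤ d ∧ d < (pre.length : Int) ∧
    ∃ c : Nat, last.get? lake = some (c : Int) ∧ c ≤ zeros.length ∧
      (∀ k, k < zeros.length → (d < zeros.getD k 0 ↔ c ≤ k))) ∧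
  (∀ q : Int, (pre.length : Int) ≤ q → fill.get? q = none) ∧
  ans.length = pre.length + xs.length ∧
  (∀ dn : Nat, dn < pre.length →
    ans.getD dn 0 = (if pre.getD dn 0 = 0 then fill.getD (dn : Int) 1 else (-1 : Int))) ∧
  (∀ dn : Nat, pre.length ≤ dn → dn < pre.length + xs.length → ans.getD dn 0 = 1)


-- ---- generic list glue ----
lemma eraseIdx_append_cons (l1 l2 : List Int) (a : Int) :
    (l1 ++ a :: l2).eraseIdx l1.length = l1 ++ l2 := by
  induction l1 with
  | nil => simp
  | cons x t ih => simpa [List.eraseIdx] using ih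

lemma getElem_append_cons_length (l1 l2 : List Int) (a : Int)
    (h : l1.length < (l1 ++ a :: l2).length) : (l1 ++ a :: l2)[l1.length] = a := by
  rw [List.getElem_append_right (le_refl _)]
  simp

-- ---- freeFrom ----
lemma ff_of_free (u : Nat → Bool) (m c : Nat) (hcm : c < m) (hfree : u c = false) :
    freeFrom u m c = c := by
  unfold freeFrom; simp [hcm, hfree]

lemma ff_of_ge (u : Nat → Bool) (m c : Nat) (hcm : m ≤ c) : freeFrom u m c = m := by
  unfold freeFrom; simp [show ¬ c < m by omega]

lemma ff_bounds (u : Nat → Bool) (m : Nat) : ∀ c, c ≤ m → c ≤ freeFrom u m c ∧ freeFrom u m c ≤ m := by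
  intro c hc
  induction hm : m - c generalizing c with
  | zero =>
    have : ¬ c < m := by omega
    unfold freeFrom; simp [this]; omega
  | succ n ih =>
    unfold freeFrom
    by_cases h : c < m
    · simp only [h, dif_pos]
      by_cases hu : u c
      · have := ih (c+1) (by omega) (by omega)
        simp [hu]; omega
      · simp [hu]; omega
    · simp [h]; omega

lemma ff_used (u : Nat → Bool) (m : Nat) : ∀ c t, c ≤ t → t < freeFrom u m c → u t = true := by
  intro c t hct ht
  induction hm : m - c generalizing c with
  | zero =>
    have h : ¬ c < m := by omega
    unfold freeFrom at ht; simp [h] at ht; omega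
  | succ n ih =>
    by_cases h : c < m
    · unfold freeFrom at ht
      simp only [h, dif_pos] at ht
      by_cases hu : u c
      · simp only [hu, if_pos] at ht
        rcases Nat.eq_or_lt_of_le hct with rfl | hlt
        · exact hu
        · exact ih (c+1) hlt ht (by omega)
      · simp [hu] at ht; omega
    · unfold freeFrom at ht; simp [h] at ht; omega

lemma ff_free (u : Nat → Bool) (m : Nat) : ∀ c, c ≤ m → freeFrom u m c < m → u (freeFrom u m c) = false := by
  intro c hc hlt
  induction hm : m - c generalizing c with
  | zero =>
    rw [ff_of_ge u m c (by omega)] at hlt; omega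
  | succ n ih =>
    by_cases h : c < m
    · by_cases hu : u c
      · rw [show freeFrom u m c = freeFrom u m (c+1) from by rw [freeFrom]; simp [h, hu]] at hlt ⊢
        exact ih (c+1) (by omega) hlt (by omega)
      · rw [ff_of_free u m c h (by simpa using hu)]
        simpa using hu
    · rw [ff_of_ge u m c (by omega)] at hlt; omega

lemma ff_congr (u : Nat → Bool) (m : Nat) : ∀ c p, c ≤ p → p ≤ m →
    (∀ t, c ≤ t → t < p → u t = true) → freeFrom u m c = freeFrom u m p := by
  intro c p hcp hpm hused
  induction hd : p - c generalizing c with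
  | zero =>
    have : c = p := by omega
    rw [this]
  | succ n ih =>
    have hcm : c < m := by omega
    have huc : u c = true := hused c (le_refl _) (by omega)
    rw [show freeFrom u m c = freeFrom u m (c+1) from by rw [freeFrom]; simp [hcm, huc]]
    exact ih (c+1) (by omega) (fun t h1 h2 => hused t (by omega) h2) (by omega)

-- ---- find / compress / mark-used ----
lemma bFindRoot_eq (parent : List Int) (u : Nat → Bool) (m : Nat)
    (hInv : InvP parent u m) :
    ∀ (fuel : Nat) (c : Nat), c ≤ m → m - c < fuel →
      bFindRoot parent (m : Int) fuel (c : Int) = ((freeFrom u m c : Nat) : Int) := by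
  intro fuel
  induction fuel with
  | zero => intro c hc h; omega
  | succ fuel ih =>
    intro c hc hfuel
    rcases Nat.eq_or_lt_of_le hc with rfl | hcm
    · unfold bFindRoot
      rw [ff_of_ge u c c (le_refl _)]
      simp
    · obtain ⟨hlen, hP⟩ := hInv
      obtain ⟨p, hpget, hcp, hpm, hintv, hup⟩ := hP c hcm
      unfold bFindRoot
      rw [show PySem.List.pyGetD parent (c : Int) 0 = parent.getD c 0 from
        PySem.List.pyGetD_natCast parent c 0, hpget]
      by_cases hpc : p = c
      · subst hpc
        simp only [ne_eq, not_true_eq_false, and_false, if_false]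
        have hfree : u p = false := by
          by_cases hu : u p
          · exact absurd (hup hu) (by omega)
          · simpa using hu
        rw [ff_of_free u m p hcm hfree]
      · have hcond : ((c : Int) < (m : Int) ∧ ¬ ((p : Int) = (c : Int))) := by
          constructor
          · exact_mod_cast hcm
          · exact_mod_cast hpc
        simp only [ne_eq, hcond.1, hcond.2, not_false_eq_true, and_self, if_true]
        have hclt : c < p := by omega
        rw [ih p hpm (by omega)]
        rw [ff_congr u m c p (by omega) hpm hintv]

lemma bCompress_inv (u : Nat → Bool) (m R : Nat) (hRm : R < m) (hfree : u R = false) :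
    ∀ (fuel : Nat) (parent : List Int) (c : Nat), InvP parent u m → c ≤ m →
      freeFrom u m c = R → InvP (bCompress parent (R : Int) fuel (c : Int)) u m := by
  intro fuel
  induction fuel with
  | zero => intro parent c hInv _ _; exact hInv
  | succ fuel ih =>
    intro parent c hInv hcm hffc
    have hcR : c ≤ R := by
      have := ff_bounds u m c hcm; omega
    have hclt : c < m := by omega
    obtain ⟨hlen, hP⟩ := hInv
    obtain ⟨p, hpget, hcp, hpm, hintv, hup⟩ := hP c hclt
    unfold bCompress
    simp only
    rw [show PySem.List.pyGetD parent (c : Int) 0 = parent.getD c 0 from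
      PySem.List.pyGetD_natCast parent c 0, hpget]
    by_cases hpR : p = R
    · subst hpR
      rw [if_neg (by simp)]
      exact ⟨hlen, hP⟩
    · have hcondR : ((p : Int) ≠ (R : Int)) := by exact_mod_cast hpR
      simp only [ne_eq, hcondR, not_false_eq_true, if_true]
      -- u c must be true, c < p ≤ R
      have huc : u c = true := by
        by_cases hu : u c
        · exact hu
        · exfalso
          have hpc : p = c := by
            by_contra hne
            have : u c = true := hintv c (le_refl _) (by omega)
            simp [this] at hu
          have : freeFrom u m c = c := ff_of_free u m c hclt (by simpa using hu)
          omega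
      have hcltp : c < p := hup huc
      have hpR' : p ≤ R := by
        by_contra hgt
        have : u R = true := hintv R hcR (by omega)
        simp [hfree] at this
      -- set parent[c] := R preserves InvP
      have hset : InvP (PySem.List.pySetD parent (c : Int) (R : Int)) u m := by
        rw [PySem.List.pySetD_natCast]
        refine ⟨by simpa using hlen, ?_⟩
        intro k hk
        by_cases hkc : k = c
        · subst hkc
          refine ⟨R, ?_, hcR, by omega, ?_, fun _ => by omega⟩
          · rw [List.getD_eq_getElem _ _ (by simpa [hlen] using hk),
              List.getElem_set_self]
          · intro t h1 h2
            exact ff_used u m k t h1 (by omega)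
        · obtain ⟨q, hq1, hq2, hq3, hq4, hq5⟩ := hP k hk
          refine ⟨q, ?_, hq2, hq3, hq4, hq5⟩
          rw [List.getD_eq_getElem _ _ (by simpa [hlen] using hk),
            List.getElem_set_ne (by omega), ← List.getD_eq_getElem _ _ (by simpa [hlen] using hk)]
          exact hq1
      have hffp : freeFrom u m p = R := by
        rw [← ff_congr u m c p (by omega) hpm hintv]; exact hffc
      exact ih (PySem.List.pySetD parent (c : Int) (R : Int)) p hset (by omega) hffp

lemma markUsed_inv (parent : List Int) (u : Nat → Bool) (m R : Nat)
    (hInv : InvP parent u m) (hRm : R < m) :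
    InvP (PySem.List.pySetD parent (R : Int) ((R : Int) + 1)) (updU u R) m := by
  obtain ⟨hlen, hP⟩ := hInv
  rw [PySem.List.pySetD_natCast]
  refine ⟨by simpa using hlen, ?_⟩
  intro k hk
  by_cases hkR : k = R
  · subst hkR
    refine ⟨k + 1, ?_, by omega, by omega, ?_, fun _ => by omega⟩
    · rw [List.getD_eq_getElem _ _ (by simpa [hlen] using hk), List.getElem_set_self]
      push_cast; ring
    · intro t h1 h2
      have : t = k := by omega
      subst this; simp [updU]
  · obtain ⟨q, hq1, hq2, hq3, hq4, hq5⟩ := hP k hk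
    refine ⟨q, ?_, hq2, hq3, ?_, ?_⟩
    · rw [List.getD_eq_getElem _ _ (by simpa [hlen] using hk),
        List.getElem_set_ne (by omega), ← List.getD_eq_getElem _ _ (by simpa [hlen] using hk)]
      exact hq1
    · intro t h1 h2
      by_cases htR : t = R
      · simp [updU, htR]
      · simp [updU, htR]; exact hq4 t h1 h2
    · intro hu
      apply hq5
      simpa [updU, hkR] using hu

-- ---- frees / dryOf ----
lemma mem_frees (u : Nat → Bool) (m k : Nat) : k ∈ frees u m ↔ k < m ∧ u k = false := by
  simp [frees, List.mem_filter, List.mem_range]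

lemma frees_pairwise (u : Nat → Bool) (m : Nat) : (frees u m).Pairwise (· < ·) :=
  List.Pairwise.filter _ List.pairwise_lt_range

def tailF (u : Nat → Bool) (m R : Nat) : List Nat :=
  ((List.range (m - (R + 1))).map (fun t => R + 1 + t)).filter (fun k => !u k)

lemma frees_split (u : Nat → Bool) (m R : Nat) (hRm : R < m) (hfree : u R = false) :
    frees u m = frees u R ++ R :: tailF u m R := by
  unfold frees tailF
  have hm : m = (R + 1) + (m - (R + 1)) := by omega
  rw [hm, List.range_add, List.filter_append, List.range_succ, List.filter_append]
  simp [hfree]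

lemma frees_updU (u : Nat → Bool) (m R : Nat) (hRm : R < m) :
    frees (updU u R) m = frees u R ++ tailF u m R := by
  unfold frees tailF
  have hm : m = (R + 1) + (m - (R + 1)) := by omega
  rw [hm, List.range_add, List.filter_append, List.range_succ, List.filter_append]
  have h1 : (List.range R).filter (fun k => !(updU u R) k) =
      (List.range R).filter (fun k => !u k) := by
    apply List.filter_congr
    intro x hx
    simp only [List.mem_range] at hx
    simp [updU, show x ≠ R by omega]
  have h2 : ((List.range (m - (R+1))).map (fun t => R + 1 + t)).filter (fun k => !(updU u R) k) =
      ((List.range (m - (R+1))).map (fun t => R + 1 + t)).filter (fun k => !u k) := by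
    apply List.filter_congr
    intro x hx
    simp only [List.mem_map, List.mem_range] at hx
    obtain ⟨t, ht, rfl⟩ := hx
    simp [updU, show R + 1 + t ≠ R by omega]
  rw [h1, h2]
  simp [updU]

lemma dryOf_pairwise (zeros : List Int) (u : Nat → Bool)
    (hz : zeros.Pairwise (· < ·)) : (dryOf zeros u).Pairwise (· ≤ ·) := by
  unfold dryOf
  rw [List.pairwise_map]
  apply List.Pairwise.imp_of_mem (R := (· < ·)) _ (frees_pairwise u zeros.length)
  intro a b ha hb hab
  have ha' := (mem_frees _ _ _).mp ha
  have hb' := (mem_frees _ _ _).mp hb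
  rw [List.getD_eq_getElem _ _ ha'.1, List.getD_eq_getElem _ _ hb'.1]
  have := List.pairwise_iff_getElem.mp hz a b ha'.1 hb'.1 hab
  omega

-- bisectRight is determined by the split point
lemma bisect_eq (xs : List Int) (x : Int) (t : Nat) (hs : xs.Pairwise (· ≤ ·))
    (ht : t ≤ xs.length)
    (h1 : ∀ (j : Nat) (hj : j < xs.length), j < t → xs[j] ≤ x)
    (h2 : ∀ (j : Nat) (hj : j < xs.length), t ≤ j → x < xs[j]) :
    PySem.List.bisectRight xs x = t := by
  obtain ⟨hb1, hb2, hb3⟩ := PySem.List.bisectRight_spec xs x hs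
  set b := PySem.List.bisectRight xs x with hb
  rcases Nat.lt_trichotomy b t with h | h | h
  · have hblen : b < xs.length := by omega
    have := h1 b hblen h
    have := hb3 b hblen (le_refl _)
    omega
  · exact h
  · have htlen : t < xs.length := by omega
    have := h2 t htlen (le_refl _)
    have := hb2 t htlen h
    omega


-- getD/set glue
lemma getD_set_self (l : List Int) (n : Nat) (v : Int) (h : n < l.length) :
    (l.set n v).getD n 0 = v := by
  rw [List.getD_eq_getElem _ _ (by simpa using h), List.getElem_set_self]

lemma getD_set_ne (l : List Int) (n k : Nat) (v : Int) (h : k ≠ n) :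
    (l.set n v).getD k 0 = l.getD k 0 := by
  rw [List.getD_eq_getElem?_getD, List.getElem?_set_ne (Ne.symm h), ← List.getD_eq_getElem?_getD]

-- bisect on a decomposed sorted list
lemma bisect_split (l1 l2 : List Int) (a x : Int)
    (hs : (l1 ++ a :: l2).Pairwise (· ≤ ·))
    (h1 : ∀ y ∈ l1, y ≤ x) (h2 : x < a) :
    PySem.List.bisectRight (l1 ++ a :: l2) x = l1.length := by
  have hcons : ∀ y ∈ a :: l2, x < y := by
    intro y hy
    rcases List.mem_cons.mp hy with rfl | hy2
    · exact h2
    · have := (List.pairwise_append.mp hs).2.1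
      have : a ≤ y := (List.pairwise_cons.mp this).1 y hy2
      omega
  apply bisect_eq _ _ _ hs (by simp)
  · intro j hj hjt
    rw [List.getElem_append_left hjt]
    exact h1 _ (List.getElem_mem hjt)
  · intro j hj hjt
    rw [List.getElem_append_right hjt]
    exact hcons _ (List.getElem_mem _)

lemma bisect_all_le (l : List Int) (x : Int) (hs : l.Pairwise (· ≤ ·))
    (h : ∀ y ∈ l, y ≤ x) : PySem.List.bisectRight l x = l.length := by
  apply bisect_eq _ _ _ hs (le_refl _)
  · intro j hj _
    exact h _ (List.getElem_mem hj)
  · intro j hj hjt; omega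

lemma frees_snoc (u : Nat → Bool) (m : Nat) (hm : u m = false) :
    frees u (m + 1) = frees u m ++ [m] := by
  unfold frees
  rw [List.range_succ, List.filter_append]
  simp [hm]

-- final answer assembly
lemma final_eq (pre : List Int) (fill : PySem.Dict Int Int) (ans : List Int)
    (h1 : ans.length = pre.length)
    (h2 : ∀ dn : Nat, dn < pre.length →
      ans.getD dn 0 = if pre.getD dn 0 = 0 then fill.getD (dn : Int) 1 else (-1 : Int)) :
    ans = (PySem.List.enumerate pre 0).map
      (fun di => if di.2 ≠ 0 then (-1 : Int) else fill.getD di.1 1) := by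
  apply List.ext_getElem
  · simp [PySem.List.length_enumerate, h1]
  · intro i hi1 hi2
    have hip : i < pre.length := by omega
    rw [List.getElem_map, PySem.List.getElem_enumerate pre 0 i
      (by simp [PySem.List.length_enumerate, hip])]
    simp only [zero_add]
    rw [← List.getD_eq_getElem ans 0 hi1, h2 i hip, List.getD_eq_getElem pre 0 hip]
    by_cases h : pre[i] = 0 <;> simp [h]

-- the three RelAB step lemmas
lemma rel_step_zero (pre rest dry zeros parent : List Int)
    (lr last fill : PySem.Dict Int Int) (ans : List Int) (u : Nat → Bool)
    (hRel : RelAB pre (0 :: rest) dry zeros parent lr last fill ans u) :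
    RelAB (pre ++ [0]) rest (dry ++ [(pre.length : Int)]) (zeros ++ [(pre.length : Int)])
      (parent ++ [(zeros.length : Int)]) lr last fill ans u := by
  obtain ⟨hZ1, hZ2, hD, hP, hU, hL1, hL2, hF, hA1, hA2, hA3⟩ := hRel
  have hum : u zeros.length = false := by
    by_cases h : u zeros.length
    · exact absurd (hU _ h) (lt_irrefl _)
    · simpa using h
  have hmem_lt : ∀ a ∈ zeros, a < (pre.length : Int) := by
    intro a ha
    obtain ⟨k, hk, rfl⟩ := List.mem_iff_getElem.mp ha
    rw [← List.getD_eq_getElem zeros 0 hk]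
    exact (hZ2 k hk).2.1
  refine ⟨?_, ?_, ?_, ?_, ?_, hL1, ?_, ?_, ?_, ?_, ?_⟩
  · rw [List.pairwise_append]
    exact ⟨hZ1, List.pairwise_singleton _ _, fun a ha b hb => by
      simp only [List.mem_singleton] at hb; subst hb; exact hmem_lt a ha⟩
  · intro k hk
    simp only [List.length_append, List.length_singleton] at hk
    rcases Nat.lt_or_ge k zeros.length with h | h
    · rw [List.getD_append _ _ _ _ h]
      obtain ⟨e1, e2, e3⟩ := hZ2 k h
      refine ⟨e1, by simp only [List.length_append, List.length_singleton, List.length_nil, List.length_cons]; push_cast; omega, ?_⟩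
      rw [List.getD_append]
      · exact e3
      · omega
    · have hkz : k = zeros.length := by omega
      subst hkz
      rw [List.getD_append_right _ _ _ _ (le_refl _)]
      simp only [Nat.sub_self, List.getD_cons_zero]
      refine ⟨by positivity, by simp only [List.length_append, List.length_singleton, List.length_nil, List.length_cons]; push_cast; omega, ?_⟩
      rw [Int.toNat_natCast, List.getD_append_right _ _ _ _ (le_refl _)]
      simp
  · unfold dryOf
    rw [List.length_append, List.length_singleton, frees_snoc u zeros.length hum,
      List.map_append, hD]
    unfold dryOf
    congr 1
    · apply List.map_congr_left
      intro k hk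
      have := (mem_frees u zeros.length k).mp hk
      rw [List.getD_append _ _ _ _ this.1]
    · simp [List.getD_append_right]
  · obtain ⟨hlen, hPk⟩ := hP
    constructor
    · simp [hlen]
    · intro k hk
      simp only [List.length_append, List.length_singleton] at hk
      rcases Nat.lt_or_ge k zeros.length with h | h
      · obtain ⟨p, h1, h2, h3, h4, h5⟩ := hPk k h
        refine ⟨p, ?_, h2, by (try simp only [List.length_append, List.length_singleton, List.length_nil, List.length_cons]); omega, h4, h5⟩
        rw [List.getD_append _ _ _ _ (by omega : k < parent.length)]
        exact h1
      · have hkz : k = zeros.length := by omega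
        subst hkz
        refine ⟨zeros.length, ?_, le_refl _, by (try simp only [List.length_append, List.length_singleton, List.length_nil, List.length_cons]); omega, by (try simp only [List.length_append, List.length_singleton, List.length_nil, List.length_cons]); omega, ?_⟩
        · rw [List.getD_append_right _ _ _ _ (by omega : parent.length ≤ zeros.length)]
          simp [hlen]
        · intro hu; exact absurd (hU _ hu) (lt_irrefl _)
  · intro k hu
    have := hU k hu
    simp only [List.length_append, List.length_singleton]
    omega
  · intro lake d hget
    obtain ⟨e1, e2, c, e3, e4, e5⟩ := hL2 lake d hget
    refine ⟨e1, by simp only [List.length_append, List.length_singleton, List.length_nil, List.length_cons]; push_cast; omega, c, e3, by simp; omega, ?_⟩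
    intro k hk
    simp only [List.length_append, List.length_singleton] at hk
    rcases Nat.lt_or_ge k zeros.length with h | h
    · rw [List.getD_append _ _ _ _ h]
      exact e5 k h
    · have hkz : k = zeros.length := by omega
      subst hkz
      rw [List.getD_append_right _ _ _ _ (le_refl _)]
      simp only [Nat.sub_self, List.getD_cons_zero]
      constructor
      · intro _; omega
      · intro _; omega
  · intro q hq
    apply hF
    push_cast [List.length_append] at hq ⊢
    omega
  · simp only [List.length_append, List.length_singleton, List.length_nil, List.length_cons] at hA1 ⊢
    omega
  · intro dn hdn
    simp only [List.length_append, List.length_singleton] at hdn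
    rcases Nat.lt_or_ge dn pre.length with h | h
    · rw [List.getD_append _ _ _ _ h]
      exact hA2 dn h
    · have hdz : dn = pre.length := by omega
      subst hdz
      rw [List.getD_append_right _ _ _ _ (le_refl _)]
      simp only [Nat.sub_self, List.getD_cons_zero, if_pos rfl]
      rw [hA3 pre.length (le_refl _) (by simp only [List.length_cons]; omega)]
      rw [PySem.Dict.getD_of_get?_eq_none]
      · simp
      · exact hF (pre.length : Int) (le_refl _)
  · intro dn h1 h2
    simp only [List.length_append, List.length_singleton] at h1 h2
    apply hA3 dn (by omega) (by simp; omega)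

lemma rel_step_new (x : Int) (pre rest dry zeros parent : List Int)
    (lr last fill : PySem.Dict Int Int) (ans : List Int) (u : Nat → Bool)
    (hx : x ≠ 0) (hnone : lr.get? x = none)
    (hRel : RelAB pre (x :: rest) dry zeros parent lr last fill ans u) :
    RelAB (pre ++ [x]) rest dry zeros parent (lr.insert x (pre.length : Int))
      (last.insert x (zeros.length : Int)) fill (ans.set pre.length (-1)) u := by
  obtain ⟨hZ1, hZ2, hD, hP, hU, hL1, hL2, hF, hA1, hA2, hA3⟩ := hRel
  have hanslen : pre.length < ans.length := by
    simp only [List.length_cons] at hA1; omega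
  refine ⟨hZ1, ?_, hD, hP, hU, ?_, ?_, ?_, ?_, ?_, ?_⟩
  · intro k hk
    obtain ⟨e1, e2, e3⟩ := hZ2 k hk
    refine ⟨e1, by simp only [List.length_append, List.length_singleton, List.length_nil, List.length_cons]; push_cast; omega, ?_⟩
    rw [List.getD_append _ _ _ _ (by omega : (zeros.getD k 0).toNat < pre.length)]
    exact e3
  · intro lake
    rw [PySem.Dict.get?_insert, PySem.Dict.get?_insert]
    by_cases h : lake = x
    · simp [h]
    · simp only [if_neg h]; exact hL1 lake
  · intro lake d hget
    rw [PySem.Dict.get?_insert] at hget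
    by_cases h : lake = x
    · rw [if_pos h] at hget
      injection hget with hd
      subst hd
      refine ⟨by positivity, by simp only [List.length_append, List.length_singleton, List.length_nil, List.length_cons]; push_cast; omega,
        zeros.length, ?_, le_refl _, ?_⟩
      · rw [PySem.Dict.get?_insert, if_pos h]
      · intro k hk
        obtain ⟨e1, e2, _⟩ := hZ2 k hk
        constructor
        · intro hlt; omega
        · intro hle; omega
    · rw [if_neg h] at hget
      obtain ⟨e1, e2, c, e3, e4, e5⟩ := hL2 lake d hget
      refine ⟨e1, by simp only [List.length_append, List.length_singleton, List.length_nil, List.length_cons]; push_cast; omega, c, ?_, e4, e5⟩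
      rw [PySem.Dict.get?_insert, if_neg h]
      exact e3
  · intro q hq
    apply hF
    push_cast [List.length_append] at hq
    omega
  · simp only [List.length_set] 
    simp only [List.length_append, List.length_singleton, List.length_nil, List.length_cons] at hA1 ⊢
    omega
  · intro dn hdn
    simp only [List.length_append, List.length_singleton] at hdn
    rcases Nat.lt_or_ge dn pre.length with h | h
    · rw [getD_set_ne _ _ _ _ (by omega), List.getD_append _ _ _ _ h]
      exact hA2 dn h
    · have hdz : dn = pre.length := by omega
      subst hdz
      rw [getD_set_self _ _ _ hanslen,
        List.getD_append_right _ _ _ _ (le_refl _)]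
      simp [hx]
  · intro dn h1 h2
    simp only [List.length_append, List.length_singleton] at h1 h2
    rw [getD_set_ne _ _ _ _ (by omega)]
    apply hA3 dn (by omega) (by simp only [List.length_cons]; omega)

lemma rel_step_flood (x d : Int) (pre rest dry zeros parent : List Int)
    (lr last fill : PySem.Dict Int Int) (ans : List Int) (u : Nat → Bool) (c R : Nat)
    (hx : x ≠ 0) (hsome : lr.get? x = some d)
    (hc : last.get? x = some (c : Int)) (hcm : c ≤ zeros.length)
    (hR : freeFrom u zeros.length c = R) (hRm : R < zeros.length)
    (parent2 : List Int)
    (hP2 : InvP parent2 (updU u R) zeros.length)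
    (hRel : RelAB pre (x :: rest) dry zeros parent lr last fill ans u) :
    RelAB (pre ++ [x]) rest (dryOf zeros (updU u R)) zeros parent2
      (lr.insert x (pre.length : Int)) (last.insert x (zeros.length : Int))
      (fill.insert (zeros.getD R 0) x)
      ((ans.set (zeros.getD R 0).toNat x).set pre.length (-1)) (updU u R) := by
  obtain ⟨hZ1, hZ2, hD, hP, hU, hL1, hL2, hF, hA1, hA2, hA3⟩ := hRel
  obtain ⟨hz0, hzlt, hzpre⟩ := hZ2 R hRm
  have hzNatlt : (zeros.getD R 0).toNat < pre.length := by omega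
  have hanslen : pre.length < ans.length := by simp only [List.length_cons] at hA1; omega
  refine ⟨hZ1, ?_, rfl, hP2, ?_, ?_, ?_, ?_, ?_, ?_, ?_⟩
  · intro k hk
    obtain ⟨e1, e2, e3⟩ := hZ2 k hk
    refine ⟨e1, by (simp only [List.length_append, List.length_nil, List.length_cons]; push_cast; omega), ?_⟩
    rw [List.getD_append _ _ _ _ (by omega : (zeros.getD k 0).toNat < pre.length)]
    exact e3
  · intro k hu
    by_cases hkR : k = R
    · omega
    · exact hU k (by simpa [updU, hkR] using hu)
  · intro lake
    rw [PySem.Dict.get?_insert, PySem.Dict.get?_insert]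
    by_cases h : lake = x
    · simp [h]
    · simp only [if_neg h]; exact hL1 lake
  · intro lake d' hget
    rw [PySem.Dict.get?_insert] at hget
    by_cases h : lake = x
    · rw [if_pos h] at hget
      injection hget with hd
      subst hd
      refine ⟨by positivity, by (simp only [List.length_append, List.length_nil, List.length_cons]; push_cast; omega), zeros.length, ?_, le_refl _, ?_⟩
      · rw [PySem.Dict.get?_insert, if_pos h]
      · intro k hk
        obtain ⟨e1, e2, _⟩ := hZ2 k hk
        exact ⟨fun hlt => by omega, fun hle => by omega⟩
    · rw [if_neg h] at hget
      obtain ⟨e1, e2, c', e3, e4, e5⟩ := hL2 lake d' hget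
      refine ⟨e1, by (simp only [List.length_append, List.length_nil, List.length_cons]; push_cast; omega), c', ?_, e4, e5⟩
      rw [PySem.Dict.get?_insert, if_neg h]
      exact e3
  · intro q hq
    simp only [List.length_append, List.length_nil, List.length_cons] at hq
    push_cast at hq
    rw [PySem.Dict.get?_insert, if_neg (by omega : ¬ q = zeros.getD R 0)]
    exact hF q (by omega)
  · simp only [List.length_set, List.length_append, List.length_nil,
      List.length_cons] at hA1 ⊢
    omega
  · intro dn hdn
    simp only [List.length_append, List.length_nil, List.length_cons] at hdn
    rcases Nat.lt_or_ge dn pre.length with h | h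
    · rw [getD_set_ne _ _ _ _ (by omega), List.getD_append _ _ _ _ h]
      by_cases hdz : dn = (zeros.getD R 0).toNat
      · subst hdz
        rw [getD_set_self _ _ _ (by omega)]
        rw [hzpre]
        simp only [if_pos rfl]
        rw [PySem.Dict.getD_insert,
          if_pos (by rw [Int.toNat_of_nonneg hz0] : ((zeros.getD R 0).toNat : Int) = zeros.getD R 0)]
        simp
      · rw [getD_set_ne _ _ _ _ hdz, hA2 dn h]
        have hne : ¬((dn : Int) = zeros.getD R 0) := by intro hcontra; apply hdz; omega
        by_cases hc0 : pre.getD dn 0 = 0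
        · rw [if_pos hc0, if_pos hc0, PySem.Dict.getD_insert, if_neg hne]
        · rw [if_neg hc0, if_neg hc0]
    · have hdz : dn = pre.length := by omega
      subst hdz
      rw [getD_set_self _ _ _ (by simp only [List.length_set]; omega),
        List.getD_append_right _ _ _ _ (le_refl _)]
      simp [hx]
  · intro dn h1 h2
    simp only [List.length_append, List.length_nil, List.length_cons] at h1 h2
    rw [getD_set_ne _ _ _ _ (by omega), getD_set_ne _ _ _ _ (by omega)]
    apply hA3 dn (by omega) (by simp only [List.length_cons]; omega)

lemma rel_init (xs : List Int) :
    RelAB [] xs [] [] [] PySem.Dict.empty PySem.Dict.empty PySem.Dict.empty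
      (List.replicate xs.length 1) (fun _ => false) := by
  refine ⟨List.Pairwise.nil, ?_, by simp [dryOf, frees], ⟨rfl, ?_⟩, ?_, ?_, ?_, ?_, ?_, ?_, ?_⟩
  · intro k hk; simp at hk
  · intro k hk; simp at hk
  · intro k h; simp at h
  · intro lake; simp [PySem.Dict.get?_empty]
  · intro lake d h; rw [PySem.Dict.get?_empty] at h; cases h
  · intro q _; exact PySem.Dict.get?_empty q
  · simp
  · intro dn h; simp at h
  · intro dn h1 h2
    simp only [List.length_nil, Nat.zero_add] at h2 ⊢
    exact List.getD_replicate 1 h2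

theorem sim (xs : List Int) : ∀ (pre dry zeros parent : List Int)
    (lr last fill : PySem.Dict Int Int) (ans : List Int) (u : Nat → Bool),
    RelAB pre xs dry zeros parent lr last fill ans u →
    aGo (PySem.List.enumerate xs (pre.length : Int)) dry lr ans =
      (match bGo (PySem.List.enumerate xs (pre.length : Int)) zeros parent fill last with
       | none => []
       | some fill' =>
         (PySem.List.enumerate (pre ++ xs) 0).map
           (fun di => if di.2 ≠ 0 then (-1 : Int) else fill'.getD di.1 1)) := by
  induction xs with
  | nil =>
    intro pre dry zeros parent lr last fill ans u hRel
    obtain ⟨_, _, _, _, _, _, _, _, hA1, hA2, _⟩ := hRel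
    rw [PySem.List.enumerate_nil]
    simp only [aGo, bGo, List.append_nil]
    exact final_eq pre fill ans (by simpa using hA1) hA2
  | cons x rest ih =>
    intro pre dry zeros parent lr last fill ans u hRel
    have hRel' := hRel
    obtain ⟨hZ1, hZ2, hD, hP, hU, hL1, hL2, hF, hA1, hA2, hA3⟩ := hRel'
    rw [PySem.List.enumerate_cons]
    have hcast : (pre.length : Int) + 1 = (((pre ++ [x]).length : Nat) : Int) := by
      simp only [List.length_append, List.length_cons, List.length_nil]; push_cast; ring
    have happ : pre ++ x :: rest = (pre ++ [x]) ++ rest := by simp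
    by_cases hx : x = 0
    · subst hx
      simp only [aGo, bGo, if_pos rfl]
      rw [hcast, happ]
      exact ih (pre ++ [0]) _ _ _ _ _ _ _ _ (rel_step_zero pre rest dry zeros parent
        lr last fill ans u hRel)
    · cases hget : lr.get? x with
      | none =>
        have hlast : last.get? x = none := (hL1 x).mp hget
        simp only [aGo, bGo, if_neg hx, hget, hlast]
        rw [PySem.List.pySetD_natCast, hcast, happ]
        exact ih (pre ++ [x]) _ _ _ _ _ _ _ _ (rel_step_new x pre rest dry zeros parent
          lr last fill ans u hx hget hRel)
      | some d =>
        obtain ⟨hd0, hdlt, c, hlastx, hcm, hchar⟩ := hL2 x d hget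
        have hroot : bFindRoot parent (zeros.length : Int) (parent.length + 1) (c : Int) =
            ((freeFrom u zeros.length c : Nat) : Int) := by
          apply bFindRoot_eq parent u zeros.length hP _ c hcm
          have := hP.1; omega
        set R := freeFrom u zeros.length c with hRdef
        have hRle : R ≤ zeros.length := (ff_bounds u zeros.length c hcm).2
        have hcR : c ≤ R := (ff_bounds u zeros.length c hcm).1
        simp only [aGo, bGo, if_neg hx, hget, hlastx]
        rw [hroot]
        by_cases hRm : R = zeros.length
        · -- no usable dry day: both sides return []
          have hall : ∀ y ∈ dryOf zeros u, y ≤ d := by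
            intro y hy
            obtain ⟨k, hk, rfl⟩ := List.mem_map.mp hy
            obtain ⟨hklt, hkfree⟩ := (mem_frees u zeros.length k).mp hk
            have hkc : k < c := by
              by_contra hge
              have := ff_used u zeros.length c k (by omega) (by omega)
              simp [hkfree] at this
            have hiff := hchar k hklt
            omega
          have hbis : PySem.List.bisectRight dry d = dry.length := by
            rw [hD]
            exact bisect_all_le _ _ (dryOf_pairwise _ _ hZ1) hall
          rw [hbis, if_pos rfl,
            if_pos (by exact_mod_cast congrArg (Nat.cast (R := Int)) hRm)]
        · have hRlt : R < zeros.length := by omega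
          have hfree : u R = false := ff_free u zeros.length c hcm hRlt
          obtain ⟨hz0, hzlt, hzpre⟩ := hZ2 R hRlt
          have hdry : dry = (frees u R).map (fun k => zeros.getD k 0) ++
              zeros.getD R 0 :: (tailF u zeros.length R).map (fun k => zeros.getD k 0) := by
            rw [hD]; unfold dryOf; rw [frees_split u zeros.length R hRlt hfree]; simp
          have h1 : ∀ y ∈ (frees u R).map (fun k => zeros.getD k 0), y ≤ d := by
            intro y hy
            obtain ⟨k, hk, rfl⟩ := List.mem_map.mp hy
            obtain ⟨hklt, hkfree⟩ := (mem_frees u R k).mp hk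
            have hkc : k < c := by
              by_contra hge
              have := ff_used u zeros.length c k (by omega) (by omega)
              simp [hkfree] at this
            have hiff := hchar k (by omega)
            omega
          have h2 : d < zeros.getD R 0 := (hchar R hRlt).mpr hcR
          have hbis : PySem.List.bisectRight dry d =
              ((frees u R).map (fun k => zeros.getD k 0)).length := by
            rw [hdry]
            exact bisect_split _ _ _ _ (hdry ▸ (hD ▸ dryOf_pairwise zeros u hZ1)) h1 h2
          have herase : (frees u R).map (fun k => zeros.getD k 0) ++
              (tailF u zeros.length R).map (fun k => zeros.getD k 0) =
              dryOf zeros (updU u R) := by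
            unfold dryOf
            rw [frees_updU u zeros.length R hRlt]
            simp
          have hlen_lt : ((frees u R).map (fun k => zeros.getD k 0)).length < dry.length := by
            rw [hdry]; simp only [List.length_append, List.length_map, List.length_cons]
            omega
          have hpop : PySem.List.pop? dry
              ((((frees u R).map (fun k => zeros.getD k 0)).length : Nat) : Int) =
              some (zeros.getD R 0, dryOf zeros (updU u R)) := by
            rw [PySem.List.pop?_natCast dry _ hlen_lt, ← herase]
            congr 1
            refine Prod.ext ?_ ?_
            · show dry[((frees u R).map (fun k => zeros.getD k 0)).length] = zeros.getD R 0
              rw [List.getElem_of_eq hdry]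
              exact getElem_append_cons_length _ _ _ _
            · show dry.eraseIdx ((frees u R).map (fun k => zeros.getD k 0)).length = _
              conv_lhs => rw [hdry]
              exact eraseIdx_append_cons _ _ _
          rw [hbis, if_neg (Nat.ne_of_lt hlen_lt), hpop,
            if_neg (by exact_mod_cast Nat.ne_of_lt hRlt),
            PySem.List.pyGetD_natCast zeros R 0]
          dsimp only
          rw [PySem.List.pySetD_of_nonneg _ _ hz0, PySem.List.pySetD_natCast, hcast, happ]
          exact ih (pre ++ [x]) _ _ _ _ _ _ _ _
            (rel_step_flood x d pre rest dry zeros parent lr last fill ans u c R hx hget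
              hlastx hcm hRdef.symm hRlt _
              (markUsed_inv _ u zeros.length R
                (bCompress_inv u zeros.length R hRlt hfree (parent.length + 1) parent c hP hcm
                  hRdef.symm) hRlt)
              hRel)

-- ===== VERDICT (by name: the statement is the Claim_ definition above) =====
theorem avoidFlood2_spec : Claim_equal_avoidFlood2 := by
  unfold Claim_equal_avoidFlood2
  intro rains _
  unfold Spec_avoidFlood2 avoidFlood2 avoidFlood2_alt
  by_cases h : rains = []
  · subst h; rfl
  · rw [if_neg h]
    have := sim rains [] [] [] [] PySem.Dict.empty PySem.Dict.empty PySem.Dict.empty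
      (List.replicate rains.length 1) (fun _ => false) (rel_init rains)
    simpa using this
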